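-- pv_equiv track=rewrite | github.com/noolex/sonic-mgmt-framework | CLI/actioner/show_config_ptp.py | show_ptp_two_step
-- ===== SOURCE A (Python) =====
-- def show_ptp_two_step(render_tables):
--
--     cmd_str = ''
--     cmd_prfx = 'ptp two-step '
--     if 'sonic-ptp:sonic-ptp/PTP_CLOCK/PTP_CLOCK_LIST' in render_tables:
--         for ptp_inst in render_tables['sonic-ptp:sonic-ptp/PTP_CLOCK/PTP_CLOCK_LIST']:
--           if 'two-step-flag' in ptp_inst:
--             two_step = ptp_inst['two-step-flag']
--             if two_step == 1:
--                 cmd_str = cmd_prfx + "enable"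
--             elif two_step == 0:
--                 cmd_str = cmd_prfx + "disable"
--
--     return 'CB_SUCCESS', cmd_str
-- ===== SOURCE B (Python) =====
-- def show_ptp_two_step(render_tables):
--     # Scan the instance list from the END and stop at the first valid flag
--     # (the last valid flag is the one A's overwriting loop keeps).
--     cmd_str = ''
--     for ptp_inst in reversed(render_tables.get('sonic-ptp:sonic-ptp/PTP_CLOCK/PTP_CLOCK_LIST', [])):
--         if 'two-step-flag' in ptp_inst:
--             v = ptp_inst['two-step-flag']
--             if v == 0 or v == 1:
--                 cmd_str = 'ptp two-step ' + ('enable' if v == 1 else 'disable')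
--                 break
--     return 'CB_SUCCESS', cmd_str
-- ===== Notes on version B (the rewrite author's own statement) =====
-- stated objective: simpler
-- what changed: Replaces the full overwriting scan with a reverse search that stops at the first (i.e. last) valid two-step flag and decides the command from it.
import Mathlib
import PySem

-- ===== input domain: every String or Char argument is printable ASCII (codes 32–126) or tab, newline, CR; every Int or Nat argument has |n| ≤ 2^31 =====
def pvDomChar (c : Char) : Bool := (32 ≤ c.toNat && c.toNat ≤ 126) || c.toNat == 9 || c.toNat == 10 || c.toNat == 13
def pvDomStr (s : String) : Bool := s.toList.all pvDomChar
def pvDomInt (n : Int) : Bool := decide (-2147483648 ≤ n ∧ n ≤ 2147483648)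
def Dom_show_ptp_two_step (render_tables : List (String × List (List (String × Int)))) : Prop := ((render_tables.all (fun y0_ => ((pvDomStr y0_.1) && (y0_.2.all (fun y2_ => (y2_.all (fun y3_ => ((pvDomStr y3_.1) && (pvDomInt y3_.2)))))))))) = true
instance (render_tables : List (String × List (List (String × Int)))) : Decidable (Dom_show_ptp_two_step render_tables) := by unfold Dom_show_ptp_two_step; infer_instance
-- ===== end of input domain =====

-- B change: the overwriting left-to-right scan becomes a reverse search that stops
-- at the first (= last) valid two-step flag; objective: simpler (early exit).

-- ===== PORT A =====
-- the loop body of A: overwrite cmd_str whenever a valid flag is seen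
def pvStepA (acc : String) (ptp_inst : List (String × Int)) : String :=
  match ptp_inst.lookup "two-step-flag" with
  | none => acc
  | some two_step =>
    if two_step == 1 then "ptp two-step " ++ "enable"
    else if two_step == 0 then "ptp two-step " ++ "disable"
    else acc

def show_ptp_two_step (render_tables : List (String × List (List (String × Int)))) : String × String :=
  let cmd_str :=
    match render_tables.lookup "sonic-ptp:sonic-ptp/PTP_CLOCK/PTP_CLOCK_LIST" with
    | none => ""
    | some insts => insts.foldl pvStepA ""
  ("CB_SUCCESS", cmd_str)

-- ===== PORT B =====
-- first (in scan order) instance with a valid flag decides; "" if none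
def pvPick : List (List (String × Int)) → String
  | [] => ""
  | ptp_inst :: rest =>
    match ptp_inst.lookup "two-step-flag" with
    | none => pvPick rest
    | some v =>
      if v == 0 || v == 1 then
        "ptp two-step " ++ (if v == 1 then "enable" else "disable")
      else pvPick rest

def show_ptp_two_step_alt (render_tables : List (String × List (List (String × Int)))) : String × String :=
  let insts := (render_tables.lookup "sonic-ptp:sonic-ptp/PTP_CLOCK/PTP_CLOCK_LIST").getD []
  ("CB_SUCCESS", pvPick insts.reverse)

-- ===== PRECONDITION & SPEC =====
def Spec_show_ptp_two_step (render_tables : List (String × List (List (String × Int)))) (out : String × String) : Prop := out = show_ptp_two_step_alt render_tables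
instance (render_tables : List (String × List (List (String × Int)))) (out : String × String) : Decidable (Spec_show_ptp_two_step render_tables out) := by unfold Spec_show_ptp_two_step; infer_instance

-- ===== CLAIM (what is proved, stated in full; the proofs are below) =====
def Claim_equal_show_ptp_two_step : Prop := ∀ (render_tables : List (String × List (List (String × Int)))), Dom_show_ptp_two_step render_tables → Spec_show_ptp_two_step render_tables (show_ptp_two_step render_tables)

-- ===== LEMMAS AND PROOFS =====

-- does this instance carry a valid (0/1) flag?
def pvFlagOk (i : List (String × Int)) : Bool :=
  match i.lookup "two-step-flag" with
  | none => false
  | some v => v == 0 || v == 1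

-- the command an instance with a valid flag yields
def pvOut (i : List (String × Int)) : String :=
  match i.lookup "two-step-flag" with
  | none => ""
  | some v => "ptp two-step " ++ (if v == 1 then "enable" else "disable")

-- does the list contain an instance with a valid flag?
def pvHasValid (l : List (List (String × Int))) : Bool := l.any pvFlagOk

theorem pvHasValid_nil : pvHasValid [] = false := rfl

theorem pvHasValid_cons (i : List (String × Int)) (t : List (List (String × Int))) :
    pvHasValid (i :: t) = (pvFlagOk i || pvHasValid t) := by
  simp [pvHasValid]

theorem pvHasValid_reverse (l : List (List (String × Int))) :
    pvHasValid l.reverse = pvHasValid l := by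
  simp [pvHasValid]

theorem pvPick_cons (i : List (String × Int)) (rest : List (List (String × Int))) :
    pvPick (i :: rest) = if pvFlagOk i then pvOut i else pvPick rest := by
  cases h : i.lookup "two-step-flag" with
  | none => simp [pvPick, pvFlagOk, h]
  | some v =>
    by_cases hv : (v == 0 || v == 1) = true <;>
      simp [pvPick, pvFlagOk, pvOut, h, hv]

theorem pvPick_append (xs ys : List (List (String × Int))) :
    pvPick (xs ++ ys) = if pvHasValid xs then pvPick xs else pvPick ys := by
  induction xs with
  | nil => simp [pvHasValid_nil]
  | cons i t ih =>
    rw [List.cons_append, pvPick_cons, pvPick_cons, pvHasValid_cons]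
    cases hf : pvFlagOk i <;> simp [ih]

theorem pvStepA_eq (acc : String) (i : List (String × Int)) :
    pvStepA acc i = if pvFlagOk i then pvOut i else acc := by
  cases h : i.lookup "two-step-flag" with
  | none => simp [pvStepA, pvFlagOk, h]
  | some v =>
    by_cases h1 : (v == 1) = true
    · simp [pvStepA, pvFlagOk, pvOut, h, h1]
    · by_cases h0 : (v == 0) = true <;>
        simp [pvStepA, pvFlagOk, pvOut, h, h1, h0]

theorem pvFoldl_eq (l : List (List (String × Int))) (acc : String) :
    l.foldl pvStepA acc = if pvHasValid l then pvPick l.reverse else acc := by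
  induction l generalizing acc with
  | nil => simp [pvHasValid_nil]
  | cons i t ih =>
    rw [List.foldl_cons, ih, List.reverse_cons, pvPick_append, pvHasValid_cons,
      pvHasValid_reverse, pvStepA_eq]
    have h1 : pvPick [i] = if pvFlagOk i then pvOut i else "" := pvPick_cons i []
    cases hf : pvFlagOk i <;> cases ht : pvHasValid t <;> simp [h1, hf]

theorem pvPick_empty (l : List (List (String × Int))) (h : pvHasValid l = false) :
    pvPick l = "" := by
  induction l with
  | nil => rfl
  | cons i t ih =>
    rw [pvHasValid_cons, Bool.or_eq_false_iff] at h
    rw [pvPick_cons, h.1]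
    exact ih h.2

-- ===== VERDICT (by name: the statement is the Claim_ definition above) =====
theorem show_ptp_two_step_spec : Claim_equal_show_ptp_two_step := by
  intro rt _
  unfold Spec_show_ptp_two_step show_ptp_two_step show_ptp_two_step_alt
  cases h : rt.lookup "sonic-ptp:sonic-ptp/PTP_CLOCK/PTP_CLOCK_LIST" with
  | none => simp [pvPick]
  | some insts =>
    simp only [Option.getD_some, Prod.mk.injEq, true_and]
    rw [pvFoldl_eq]
    cases hv : pvHasValid insts with
    | true => simp
    | false =>
      have := pvPick_empty insts.reverse (by rw [pvHasValid_reverse]; exact hv)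
      simp [this]
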